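-- pv_equiv track=rewrite | github.com/tuguldur102/ECNDP | python/utils/assign_terminals.py | is_partition_possible
-- ===== SOURCE A (Python) =====
-- def is_partition_possible(terminal_count, min_batch_size, max_batch_size):
--   if min_batch_size > max_batch_size:
--     return False
--
--   allowed_sizes = list(range(min_batch_size, max_batch_size + 1))
--
--   reachable = [False] * (terminal_count + 1)
--   reachable[0] = True
--
--   for current_sum in range(terminal_count + 1):
--     if not reachable[current_sum]:
--       continue
--
--     for batch_size in allowed_sizes:
--       next_sum = current_sum + batch_size
--       if next_sum <= terminal_count:
--         reachable[next_sum] = True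
--
--   return reachable[terminal_count]
-- ===== SOURCE B (Python) =====
-- def is_partition_possible(terminal_count, min_batch_size, max_batch_size):
--     # Closed form: n is a sum of k batches each in [min,max] iff some k >= 0 has
--     # k*min <= n <= k*max; the smallest candidate k is ceil(n/max), and it alone decides.
--     if min_batch_size > max_batch_size:
--         return False
--     if terminal_count == 0:
--         return True
--     if max_batch_size <= 0:
--         return False  # a positive total needs at least one positive batch size
--     k = -(-terminal_count // max_batch_size)  # ceil(n / max)
--     return k * min_batch_size <= terminal_count
-- ===== Notes on version B (the rewrite author's own statement) =====
-- stated objective: simpler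
-- what changed: Replaces the boolean reachability DP over 0..terminal_count by a closed form: after the min>max guard, n is partitionable iff n = 0, or max_batch_size > 0 and ceil(n/max_batch_size)*min_batch_size <= n; Pre_ restricts to the function's natural domain (terminal_count >= 0 and min_batch_size >= 0, keeping all min>max inputs), outside which A raises IndexError or returns negative-index wraparound artefacts.
-- outside the precondition, e.g. on is_partition_possible(5, -2, -1): A returns True, B returns False; on is_partition_possible(5, -1, 3): A returns True, B returns True
import Mathlib
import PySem

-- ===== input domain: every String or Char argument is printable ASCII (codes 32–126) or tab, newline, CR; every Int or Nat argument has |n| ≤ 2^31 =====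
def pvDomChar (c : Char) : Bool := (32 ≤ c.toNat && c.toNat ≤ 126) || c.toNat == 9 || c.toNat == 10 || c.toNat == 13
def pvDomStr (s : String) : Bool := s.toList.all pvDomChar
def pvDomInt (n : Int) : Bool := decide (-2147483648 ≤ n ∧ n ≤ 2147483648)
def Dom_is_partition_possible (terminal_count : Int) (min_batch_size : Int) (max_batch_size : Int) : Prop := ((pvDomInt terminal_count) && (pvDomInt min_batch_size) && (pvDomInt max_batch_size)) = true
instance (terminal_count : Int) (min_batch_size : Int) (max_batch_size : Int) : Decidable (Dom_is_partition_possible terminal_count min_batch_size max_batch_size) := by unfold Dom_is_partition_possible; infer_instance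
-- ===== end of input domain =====

-- B decides partitionability by the closed form "n = 0, or max > 0 and ceil(n/max)*min <= n"
-- instead of A's boolean reachability DP; equivalence is proved on the function's natural
-- domain (nonnegative terminal count, nonnegative minimum batch size, plus all min>max inputs).

-- ===== PORT A =====
-- Literal port of the DP. Python's boolean list `reachable` is carried as Array Bool
-- (O(1) assignment); on the admitted inputs (Pre_) every subscript Python uses is
-- nonnegative and in range, where `.toNat` indexing with getD/setIfInBounds is exactly
-- Python's reachable[...] read/write.
def is_partition_possible (terminal_count : Int) (min_batch_size : Int) (max_batch_size : Int) : Bool :=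
  if min_batch_size > max_batch_size then false
  else
    let allowed_sizes := PySem.List.pyRange min_batch_size (max_batch_size + 1) 1
    let reachable : Array Bool :=
      (Array.replicate (terminal_count + 1).toNat false).setIfInBounds 0 true
    let reachable :=
      (PySem.List.pyRange 0 (terminal_count + 1) 1).foldl
        (fun r current_sum =>
          if r.getD current_sum.toNat false = false then r
          else
            allowed_sizes.foldl
              (fun r batch_size =>
                let next_sum := current_sum + batch_size
                if next_sum ≤ terminal_count then r.setIfInBounds next_sum.toNat true else r)
              r)
        reachable
    reachable.getD terminal_count.toNat false

-- ===== PORT B =====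
def is_partition_possible_alt (terminal_count : Int) (min_batch_size : Int) (max_batch_size : Int) : Bool :=
  if min_batch_size > max_batch_size then false
  else if terminal_count == 0 then true
  else if max_batch_size ≤ 0 then false
  else
    let k := -(PySem.Int.floordiv (-terminal_count) max_batch_size)
    decide (k * min_batch_size ≤ terminal_count)

-- ===== PRECONDITION & SPEC =====
-- Pre_ restricts to the function's natural domain (nonnegative terminal count and
-- nonnegative minimum batch size; the trivially-false min>max inputs are all kept):
-- outside it A either raises IndexError (negative terminal_count, or
-- min_batch_size < -(terminal_count+1)) or its value is an artefact of Python
-- negative-index wraparound into the reachability array, which B does not mimic.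
def Pre_is_partition_possible (terminal_count : Int) (min_batch_size : Int) (max_batch_size : Int) : Prop :=
  max_batch_size < min_batch_size ∨ (0 ≤ terminal_count ∧ 0 ≤ min_batch_size)
instance (terminal_count : Int) (min_batch_size : Int) (max_batch_size : Int) : Decidable (Pre_is_partition_possible terminal_count min_batch_size max_batch_size) := by unfold Pre_is_partition_possible; infer_instance
def pvWitness_is_partition_possible : Int × Int × Int := (7, 2, 3)

def Spec_is_partition_possible (terminal_count : Int) (min_batch_size : Int) (max_batch_size : Int) (out : Bool) : Prop := out = is_partition_possible_alt terminal_count min_batch_size max_batch_size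
instance (terminal_count : Int) (min_batch_size : Int) (max_batch_size : Int) (out : Bool) : Decidable (Spec_is_partition_possible terminal_count min_batch_size max_batch_size out) := by unfold Spec_is_partition_possible; infer_instance

-- ===== CLAIM (what is proved, stated in full; the proofs are below) =====
def Claim_equal_is_partition_possible : Prop := ∀ (terminal_count : Int) (min_batch_size : Int) (max_batch_size : Int), Dom_is_partition_possible terminal_count min_batch_size max_batch_size → Pre_is_partition_possible terminal_count min_batch_size max_batch_size → Spec_is_partition_possible terminal_count min_batch_size max_batch_size (is_partition_possible terminal_count min_batch_size max_batch_size)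

-- ===== LEMMAS AND PROOFS =====

-- The closed-form predicate: j is a sum of k batch sizes, each in [mn, mx].
def PartP (mn mx j : Int) : Prop := ∃ k : Nat, (k : Int) * mn ≤ j ∧ j ≤ (k : Int) * mx

-- Invariant predicate for the outer DP loop: after processing current sums < t,
-- cell j is true iff j = 0 or j = c + b for some processed, partitionable c and b ∈ [mn,mx].
def Good (mn mx t : Int) (j : Nat) : Prop :=
  j = 0 ∨ ∃ c : Nat, (c : Int) < t ∧ PartP mn mx c ∧ mn ≤ (j : Int) - c ∧ (j : Int) - c ≤ mx

theorem getD_setIfInBounds_nat {α : Type} (a : Array α) (i : Nat) (v d : α) (j : Nat) :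
    (a.setIfInBounds i v).getD j d = if j = i ∧ i < a.size then v else a.getD j d := by
  rw [Array.getD_eq_getD_getElem?, Array.getElem?_setIfInBounds]
  by_cases hj : i = j
  · subst hj
    by_cases hlt : i < a.size
    · rw [if_pos rfl, if_pos hlt, if_pos ⟨rfl, hlt⟩]
      simp
    · rw [if_pos rfl, if_neg hlt, if_neg (fun h => hlt h.2)]
      rw [Array.getD_eq_getD_getElem?]
      have : a[i]? = none := by
        rw [Array.getElem?_eq_none_iff]
        omega
      rw [this]
  · rw [if_neg hj, if_neg (fun h => hj h.1.symm), Array.getD_eq_getD_getElem?]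

theorem PartP_zero (mn mx : Int) : PartP mn mx 0 := ⟨0, by simp⟩

theorem PartP_unfold (mn mx : Int) (hmn : 0 ≤ mn) (hmx : mn ≤ mx) (j : Nat) :
    PartP mn mx j ↔
      (j = 0 ∨ ∃ c : Nat, (c : Int) < j ∧ PartP mn mx c ∧ mn ≤ (j : Int) - c ∧ (j : Int) - c ≤ mx) := by
  constructor
  · rintro ⟨k, hk1, hk2⟩
    by_cases hj0 : j = 0
    · exact Or.inl hj0
    have hj1 : (1 : Int) ≤ j := by omega
    have hmx0 : (0:Int) < mx := by
      by_contra h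
      push_neg at h
      have : (k : Int) * mx ≤ 0 := mul_nonpos_of_nonneg_of_nonpos (by positivity) h
      omega
    match k with
    | 0 =>
      exfalso
      have : (j : Int) ≤ 0 := by simpa using hk2
      omega
    | (k' + 1) =>
      right
      have hk'mn : (0:Int) ≤ (k' : Int) * mn := by positivity
      set c : Int := max ((k' : Int) * mn) ((j : Int) - mx) with hc
      have hc0 : 0 ≤ c := le_trans hk'mn (le_max_left _ _)
      have hcge : (k' : Int) * mn ≤ c := le_max_left _ _
      have hcmx : c ≤ (k' : Int) * mx := by
        apply max_le
        · exact mul_le_mul_of_nonneg_left hmx (by positivity)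
        · push_cast at hk2; nlinarith
      have hjc1 : mn ≤ (j : Int) - c := by
        have h1' : (k' : Int) * mn ≤ (j : Int) - mn := by push_cast at hk1; nlinarith
        have h2' : (j : Int) - mx ≤ (j : Int) - mn := by omega
        have := max_le h1' h2'
        omega
      have hjc2 : (j : Int) - c ≤ mx := by
        have := le_max_right ((k' : Int) * mn) ((j : Int) - mx)
        omega
      have hclt : c < (j : Int) := by
        have hA : (k' : Int) * mn + mn ≤ j := by push_cast at hk1; nlinarith
        have hlt1 : (k' : Int) * mn < j := by
          rcases eq_or_lt_of_le hmn with hm0 | hm1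
          · simp only [← hm0, mul_zero]; omega
          · omega
        exact max_lt hlt1 (by omega)
      have hcn : ((c.toNat : Nat) : Int) = c := Int.toNat_of_nonneg hc0
      refine ⟨c.toNat, by omega, ⟨k', ?_, ?_⟩, by omega, by omega⟩
      · rw [hcn]; exact hcge
      · rw [hcn]; exact hcmx
  · rintro (h0 | ⟨c, hct, ⟨k, hk1, hk2⟩, h1, h2⟩)
    · subst h0; exact PartP_zero mn mx
    · exact ⟨k + 1, by push_cast; nlinarith, by push_cast; nlinarith⟩

-- Effect of the inner loop (writes at indices c + b) on the cells of r.
theorem inner_fold (nn c : Int) (L : List Int) (hL : ∀ b ∈ L, 0 ≤ c + b) (r : Array Bool) :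
    (L.foldl (fun r b => if c + b ≤ nn then r.setIfInBounds (c + b).toNat true else r) r).size
        = r.size
    ∧ ∀ j : Nat,
      ((L.foldl (fun r b => if c + b ≤ nn then r.setIfInBounds (c + b).toNat true else r) r).getD j false = true
        ↔ r.getD j false = true ∨ ∃ b ∈ L, c + b ≤ nn ∧ (j : Int) = c + b ∧ (j : Int) < r.size) := by
  induction L generalizing r with
  | nil => simp
  | cons b L ih =>
    have hb : 0 ≤ c + b := hL b (by simp)
    have hL' : ∀ b' ∈ L, 0 ≤ c + b' := fun b' hb' => hL b' (by simp [hb'])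
    simp only [List.foldl_cons]
    by_cases hle : c + b ≤ nn
    · simp only [if_pos hle]
      obtain ⟨ihlen, ihget⟩ := ih hL' (r.setIfInBounds (c + b).toNat true)
      constructor
      · rw [ihlen, Array.size_setIfInBounds]
      · intro j
        rw [ihget j, getD_setIfInBounds_nat r (c + b).toNat true false j, Array.size_setIfInBounds]
        by_cases hj : (j : Int) = c + b ∧ c + b < (r.size : Int)
        · rw [if_pos (by omega)]
          constructor
          · intro _; right; exact ⟨b, by simp, hle, hj.1, by omega⟩
          · intro _; left; trivial
        · rw [if_neg (by omega)]
          constructor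
          · rintro (h | ⟨b', hb', h1, h2, h3⟩)
            · exact Or.inl h
            · exact Or.inr ⟨b', by simp [hb'], h1, h2, h3⟩
          · rintro (h | ⟨b', hb', h1, h2, h3⟩)
            · exact Or.inl h
            · rcases List.mem_cons.mp hb' with hbb | hmem
              · subst hbb; exact absurd ⟨h2, by omega⟩ hj
              · exact Or.inr ⟨b', hmem, h1, h2, h3⟩
    · simp only [if_neg hle]
      obtain ⟨ihlen, ihget⟩ := ih hL' r
      refine ⟨ihlen, fun j => ?_⟩
      rw [ihget j]
      constructor
      · rintro (h | ⟨b', hb', h1, h2, h3⟩)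
        · exact Or.inl h
        · exact Or.inr ⟨b', by simp [hb'], h1, h2, h3⟩
      · rintro (h | ⟨b', hb', h1, h2, h3⟩)
        · exact Or.inl h
        · rcases List.mem_cons.mp hb' with hbb | hmem
          · subst hbb; exact absurd h1 hle
          · exact Or.inr ⟨b', hmem, h1, h2, h3⟩

theorem Good_eq_PartP (mn mx : Int) (hmn : 0 ≤ mn) (hmx : mn ≤ mx) (t : Int) (j : Nat)
    (hj : (j : Int) ≤ t) : Good mn mx t j ↔ PartP mn mx j := by
  unfold Good
  constructor
  · rintro (h0 | ⟨c, hc, hP, h1, h2⟩)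
    · simpa [h0] using PartP_zero mn mx
    · rcases lt_or_eq_of_le (by omega : (c : Int) ≤ (j : Int)) with h | h
      · exact (PartP_unfold mn mx hmn hmx j).mpr (Or.inr ⟨c, h, hP, h1, h2⟩)
      · have hcj : c = j := by omega
        rwa [← hcj]
  · intro hP
    rcases (PartP_unfold mn mx hmn hmx j).mp hP with h0 | ⟨c, hc, hP', h1, h2⟩
    · exact Or.inl h0
    · exact Or.inr ⟨c, by omega, hP', h1, h2⟩

theorem outer_inv (n mn mx : Int) (hn : 0 ≤ n) (hmn : 0 ≤ mn) (hmx : mn ≤ mx)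
    (t : Int) (ht0 : 0 ≤ t) (ht : t ≤ n + 1) :
    ((PySem.List.pyRange 0 t 1).foldl
        (fun r current_sum =>
          if r.getD current_sum.toNat false = false then r
          else (PySem.List.pyRange mn (mx + 1) 1).foldl
            (fun r batch_size =>
              if current_sum + batch_size ≤ n then
                r.setIfInBounds (current_sum + batch_size).toNat true
              else r) r)
        ((Array.replicate (n + 1).toNat false).setIfInBounds 0 true)).size = (n + 1).toNat
    ∧ ∀ j : Nat, j < (n + 1).toNat →
      (((PySem.List.pyRange 0 t 1).foldl
        (fun r current_sum =>
          if r.getD current_sum.toNat false = false then r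
          else (PySem.List.pyRange mn (mx + 1) 1).foldl
            (fun r batch_size =>
              if current_sum + batch_size ≤ n then
                r.setIfInBounds (current_sum + batch_size).toNat true
              else r) r)
        ((Array.replicate (n + 1).toNat false).setIfInBounds 0 true)).getD j false = true
        ↔ Good mn mx t j) := by
  induction t, ht0 using Int.le_induction with
  | base =>
    rw [PySem.List.pyRange_one_eq_nil le_rfl]
    simp only [List.foldl_nil]
    constructor
    · rw [Array.size_setIfInBounds, Array.size_replicate]
    · intro j hj
      rw [getD_setIfInBounds_nat _ 0 true false j]
      unfold Good
      simp only [Array.size_replicate]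
      constructor
      · intro h
        split_ifs at h with hcond
        · exact Or.inl hcond.1
        · exfalso
          rw [Array.getD_eq_getD_getElem?, Array.getElem?_replicate] at h
          split_ifs at h <;> simp_all
      · rintro (h0 | ⟨c, hc, _⟩)
        · subst h0; rw [if_pos ⟨rfl, by omega⟩]
        · exfalso; omega
  | succ t ht0 ih =>
    have htn : t ≤ n := by omega
    obtain ⟨ihlen, ihget⟩ := ih (by omega)
    rw [PySem.List.pyRange_one_succ_right ht0, List.foldl_append, List.foldl_cons, List.foldl_nil]
    set rold := (PySem.List.pyRange 0 t 1).foldl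
        (fun r current_sum =>
          if r.getD current_sum.toNat false = false then r
          else (PySem.List.pyRange mn (mx + 1) 1).foldl
            (fun r batch_size =>
              if current_sum + batch_size ≤ n then
                r.setIfInBounds (current_sum + batch_size).toNat true
              else r) r)
        ((Array.replicate (n + 1).toNat false).setIfInBounds 0 true) with hrold
    have hcast : ((t.toNat : Nat) : Int) = t := Int.toNat_of_nonneg ht0
    have htN : t.toNat < (n + 1).toNat := by omega
    have hcellP : rold.getD t.toNat false = true ↔ PartP mn mx t := by
      rw [ihget t.toNat htN, Good_eq_PartP mn mx hmn hmx t t.toNat (by omega), hcast]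
    by_cases hb : rold.getD t.toNat false = false
    · -- cell t unreachable: array unchanged, and t contributes nothing
      rw [if_pos hb]
      have hnP : ¬ PartP mn mx t := by
        intro hP
        rw [hcellP.mpr hP] at hb
        simp at hb
      refine ⟨ihlen, fun j hj => ?_⟩
      rw [ihget j hj]
      unfold Good
      constructor <;> rintro (h0 | ⟨c, hc, hP, h1, h2⟩)
      · exact Or.inl h0
      · exact Or.inr ⟨c, by omega, hP, h1, h2⟩
      · exact Or.inl h0
      · refine Or.inr ⟨c, ?_, hP, h1, h2⟩
        rcases lt_or_eq_of_le (by omega : (c : Int) ≤ t) with h | h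
        · exact h
        · exfalso; apply hnP; rw [← h]; exact hP
    · -- cell t reachable: inner loop marks t + b for b in [mn, mx]
      rw [if_neg hb]
      have hPt : PartP mn mx t := by
        rw [← hcellP]
        revert hb
        cases rold.getD t.toNat false <;> simp
      have hL : ∀ b ∈ PySem.List.pyRange mn (mx + 1) 1, 0 ≤ t + b := by
        intro b hbmem
        rw [PySem.List.mem_pyRange_one] at hbmem
        omega
      obtain ⟨ilen, iget⟩ := inner_fold n t (PySem.List.pyRange mn (mx + 1) 1) hL rold
      refine ⟨by rw [ilen, ihlen], fun j hj => ?_⟩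
      rw [iget j, ihget j hj, ihlen]
      unfold Good
      constructor
      · rintro (h | ⟨b, hbmem, hble, hjb, hjlen⟩)
        · rcases h with h0 | ⟨c, hc, hP, h1, h2⟩
          · exact Or.inl h0
          · exact Or.inr ⟨c, by omega, hP, h1, h2⟩
        · rw [PySem.List.mem_pyRange_one] at hbmem
          exact Or.inr ⟨t.toNat, by omega, by rw [hcast]; exact hPt, by omega, by omega⟩
      · rintro (h0 | ⟨c, hc, hP, h1, h2⟩)
        · exact Or.inl (Or.inl h0)
        · rcases lt_or_eq_of_le (by omega : (c : Int) ≤ t) with h | h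
          · exact Or.inl (Or.inr ⟨c, h, hP, h1, h2⟩)
          · right
            refine ⟨(j : Int) - c, ?_, by omega, by omega, by omega⟩
            rw [PySem.List.mem_pyRange_one]
            omega

theorem partP_iff_ceil (n mn mx : Int) (hn : 1 ≤ n) (hmn : 0 ≤ mn) (hmx : 1 ≤ mx) :
    PartP mn mx n ↔ (-(PySem.Int.floordiv (-n) mx)) * mn ≤ n := by
  set q := -(PySem.Int.floordiv (-n) mx) with hq
  have hbr : (q - 1) * mx < n ∧ n ≤ q * mx :=
    (PySem.Int.neg_floordiv_neg_eq_iff_of_pos (by omega : (0:Int) < mx)).mp hq.symm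
  have hq0 : 0 ≤ q := by
    by_contra h
    push_neg at h
    have : q * mx ≤ 0 := mul_nonpos_of_nonpos_of_nonneg (by omega) (by omega)
    linarith [hbr.2]
  constructor
  · rintro ⟨k, h1, h2⟩
    have hqk : q ≤ (k : Int) := by
      by_contra h
      push_neg at h
      have hk1 : (k : Int) ≤ q - 1 := by omega
      have : (k : Int) * mx ≤ (q - 1) * mx := mul_le_mul_of_nonneg_right hk1 (by omega)
      linarith [hbr.1]
    calc q * mn ≤ (k : Int) * mn := mul_le_mul_of_nonneg_right hqk (by omega)
      _ ≤ n := h1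
  · intro h
    refine ⟨q.toNat, ?_, ?_⟩
    · rw [Int.toNat_of_nonneg hq0]; exact h
    · rw [Int.toNat_of_nonneg hq0]; exact hbr.2

theorem partP_degenerate (n : Int) (hn : 1 ≤ n) : ¬ PartP 0 0 n := by
  rintro ⟨k, _, h2⟩
  simp at h2
  omega

-- ===== VERDICT (by name: the statement is the Claim_ definition above) =====
theorem is_partition_possible_spec : Claim_equal_is_partition_possible := by
  intro n mn mx _ hpre
  unfold Spec_is_partition_possible
  simp only [is_partition_possible, is_partition_possible_alt]
  by_cases hgt : mn > mx
  · rw [if_pos hgt, if_pos hgt]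
  · rw [if_neg hgt, if_neg hgt]
    have hle : mn ≤ mx := not_lt.mp hgt
    obtain ⟨hn, hmn⟩ : 0 ≤ n ∧ 0 ≤ mn := by
      rcases hpre with h | h
      · omega
      · exact h
    obtain ⟨hlen, hget⟩ := outer_inv n mn mx hn hmn hle (n + 1) (by omega) (by omega)
    have hnN : n.toNat < (n + 1).toNat := by omega
    have h1 := hget n.toNat hnN
    rw [Good_eq_PartP mn mx hmn hle (n + 1) n.toNat (by omega)] at h1
    have hcast : ((n.toNat : Nat) : Int) = n := Int.toNat_of_nonneg hn
    rw [hcast] at h1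
    by_cases h0 : n = 0
    · rw [if_pos (by simp [h0])]
      rw [h1, h0]
      exact PartP_zero mn mx
    · rw [if_neg (by simp [h0])]
      by_cases hmx0 : mx ≤ 0
      · rw [if_pos hmx0]
        have hmn0 : mn = 0 := by omega
        have hmx00 : mx = 0 := by omega
        rw [Bool.eq_false_iff]
        intro hX
        have hnp : ¬ PartP mn mx n := by
          rw [hmn0, hmx00]; exact partP_degenerate n (by omega)
        exact hnp (h1.mp hX)
      · rw [if_neg hmx0]
        rw [partP_iff_ceil n mn mx (by omega) hmn (by omega)] at h1
        rw [Bool.eq_iff_iff, h1, decide_eq_true_iff]
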